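-- pv_equiv track=rewrite | github.com/22ema/algorithm | brute_force/start_and_link_14889.py | start_link
-- ===== SOURCE A (Python) =====
-- def start_link(index, human_number, number_list, first, second):
--     if index == human_number:
--         if len(first) != human_number//2:
--             return -1
--         if len(second) != human_number//2:
--             return -1
--         t1 = 0
--         t2 = 0
--         for i in range(human_number//2):
--             for j in range(human_number//2):
--                 if i == j:
--                     continue
--                 t1 += number_list[first[i]][first[j]]
--                 t2 += number_list[second[i]][second[j]]
--         diff = abs(t1-t2)
--         return diff
--     ans = -1
--     t1 = start_link(index+1, human_number, number_list, first+[index], second)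
--     if ans == -1 or (t1 != -1 and ans > t1):
--         ans = t1
--     t2 = start_link(index+1, human_number, number_list, first, second+[index])
--     if ans == -1 or (t2 != -1 and ans > t2):
--         ans = t2
--     return ans
-- ===== SOURCE B (Python) =====
-- def start_link(index, human_number, number_list, first, second):
--     half = human_number // 2
--     if (len(first) > half or len(second) > half
--             or len(first) + len(second) + (human_number - index) != 2 * half):
--         return -1
--     M = number_list
--
--     def link(x, team):
--         return sum(M[x][y] + M[y][x] for y in team)
--
--     def score(team):
--         s = 0
--         t = []
--         for x in team:
--             s += link(x, t)
--             t.append(x)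
--         return s
--
--     def dfs(rest, f, s, s1, s2, best):
--         if not rest:
--             d = abs(s1 - s2)
--             return d if best is None or d < best else best
--         x, rest2 = rest[0], rest[1:]
--         if len(f) < half:
--             best = dfs(rest2, f + [x], s, s1 + link(x, f), s2, best)
--         if len(s) < half:
--             best = dfs(rest2, f, s + [x], s1, s2 + link(x, s), best)
--         return best
--
--     best = dfs(list(range(index, human_number)), list(first), list(second),
--                score(first), score(second), None)
--     return -1 if best is None else best
-- ===== Notes on version B (the rewrite author's own statement) =====
-- stated objective: alternative
-- what changed: A explores the full 2^m binary assignment tree and rescores each leaf with an O(n^2) double loop; B prunes every branch whose team already has n/2 members (so only feasible combinations are visited), maintains both team scores incrementally, and rejects infeasible size configurations up front.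
-- outside the precondition, e.g. on start_link(3, 4, [[1, 2], [3, 4, 0, 0], [0, 0, 5, 6], [0, 0, 7, 8]], [0, 1], [2]): A returns 8, B returns 8
import Mathlib
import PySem

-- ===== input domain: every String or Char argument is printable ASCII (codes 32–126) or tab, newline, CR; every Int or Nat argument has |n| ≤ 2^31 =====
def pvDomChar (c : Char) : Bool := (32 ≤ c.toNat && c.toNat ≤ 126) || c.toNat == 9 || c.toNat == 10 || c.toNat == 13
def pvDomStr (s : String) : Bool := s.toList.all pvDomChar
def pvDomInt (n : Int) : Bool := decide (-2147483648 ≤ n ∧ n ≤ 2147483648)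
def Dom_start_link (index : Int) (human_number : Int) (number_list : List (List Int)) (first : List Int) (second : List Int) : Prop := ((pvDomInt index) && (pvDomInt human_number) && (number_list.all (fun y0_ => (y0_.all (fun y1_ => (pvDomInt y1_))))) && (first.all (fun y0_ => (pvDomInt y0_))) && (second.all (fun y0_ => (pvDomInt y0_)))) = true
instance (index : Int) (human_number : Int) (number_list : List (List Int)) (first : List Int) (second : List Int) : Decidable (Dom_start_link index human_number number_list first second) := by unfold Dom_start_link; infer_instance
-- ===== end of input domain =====

-- B replaces A's full binary assignment tree + double-loop leaf rescoring by a size-pruned DFS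
-- with incremental team scores (objective: alternative). Neither version mutates its arguments.

-- ===== PORT A =====
-- number_list[a][b]; Python raises IndexError out of range — Pre_ excludes those inputs, the default 0 is unreached inside Pre_
def pvM (M : List (List Int)) (a b : Int) : Int :=
  PySem.List.pyGetD (PySem.List.pyGetD M a []) b 0

-- A's leaf double loop computing (t1, t2)
def pvBaseA (M : List (List Int)) (half : Int) (first second : List Int) : Int × Int :=
  (PySem.List.pyRange 0 half 1).foldl (fun t i =>
    (PySem.List.pyRange 0 half 1).foldl (fun t j =>
      if i = j then t
      else (t.1 + pvM M (PySem.List.pyGetD first i 0) (PySem.List.pyGetD first j 0),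
            t.2 + pvM M (PySem.List.pyGetD second i 0) (PySem.List.pyGetD second j 0))) t)
    ((0 : Int), (0 : Int))

-- A's recursion; Python recurses on index until it reaches human_number — fuel = (h - index).toNat
-- makes that recursion structural (fuel 0 with index ≠ h is unreached inside Pre_, where index ≤ h)
def pvGoA (M : List (List Int)) (h : Int) (fuel : Nat) (index : Int) (first second : List Int) : Int :=
  if index = h then
    if (first.length : Int) ≠ PySem.Int.floordiv h 2 then -1
    else if (second.length : Int) ≠ PySem.Int.floordiv h 2 then -1
    else
      let t := pvBaseA M (PySem.Int.floordiv h 2) first second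
      |t.1 - t.2|
  else
    match fuel with
    | 0 => -1
    | fuel' + 1 =>
      let t1 := pvGoA M h fuel' (index + 1) (first ++ [index]) second
      let ans : Int := -1
      let ans := if ans = -1 ∨ (t1 ≠ -1 ∧ ans > t1) then t1 else ans
      let t2 := pvGoA M h fuel' (index + 1) first (second ++ [index])
      let ans := if ans = -1 ∨ (t2 ≠ -1 ∧ ans > t2) then t2 else ans
      ans

def start_link (index : Int) (human_number : Int) (number_list : List (List Int)) (first : List Int) (second : List Int) : Int :=
  pvGoA number_list human_number (human_number - index).toNat index first second

-- ===== PORT B =====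
-- link(x, team) = sum(M[x][y] + M[y][x] for y in team)
def pvLink (M : List (List Int)) (x : Int) (team : List Int) : Int :=
  team.foldl (fun a y => a + (pvM M x y + pvM M y x)) 0

-- score(team): incremental — s += link(x, t); t.append(x)
def pvScore (M : List (List Int)) (team : List Int) : Int :=
  (team.foldl (fun (p : Int × List Int) x => (p.1 + pvLink M x p.2, p.2 ++ [x])) ((0 : Int), ([] : List Int))).1

-- dfs(rest, f, s, s1, s2, best) with size pruning
def pvDfs (M : List (List Int)) (half : Int) : List Int → List Int → List Int → Int → Int → Option Int → Option Int
  | [], _, _, s1, s2, best =>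
    let d := |s1 - s2|
    match best with
    | none => some d
    | some b => if d < b then some d else some b
  | x :: rest, f, s, s1, s2, best =>
    let best := if (f.length : Int) < half then pvDfs M half rest (f ++ [x]) s (s1 + pvLink M x f) s2 best else best
    let best := if (s.length : Int) < half then pvDfs M half rest f (s ++ [x]) s1 (s2 + pvLink M x s) best else best
    best

def start_link_alt (index : Int) (human_number : Int) (number_list : List (List Int)) (first : List Int) (second : List Int) : Int :=
  let half := PySem.Int.floordiv human_number 2
  if (first.length : Int) > half ∨ (second.length : Int) > half ∨
     (first.length : Int) + (second.length : Int) + (human_number - index) ≠ 2 * half then -1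
  else
    match pvDfs number_list half (PySem.List.pyRange index human_number 1) first second
            (pvScore number_list first) (pvScore number_list second) none with
    | none => -1
    | some b => b

-- ===== PRECONDITION & SPEC =====
def pvOkPair (M : List (List Int)) (a b : Int) : Prop :=
  PySem.Raise.InRange M.length a ∧ PySem.Raise.InRange (PySem.List.pyGetD M a []).length b

-- Pre_ excludes (1) index > human_number, where Python A recurses forever (RecursionError), and
-- (2) feasible inputs (with half ≥ 2, so some matrix entry is actually read) on which an index pair
-- drawn from first(resp. second) ++ remaining would raise IndexError; this pool-pair condition is
-- slightly coarser than the exact set of pairs A reads, so a few ragged-matrix inputs on which A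
-- returns are excluded (B returns the same value there; see cites).
def Pre_start_link (index : Int) (human_number : Int) (number_list : List (List Int)) (first : List Int) (second : List Int) : Prop :=
  index ≤ human_number ∧
  (((first.length : Int) ≤ PySem.Int.floordiv human_number 2 ∧
    (second.length : Int) ≤ PySem.Int.floordiv human_number 2 ∧
    (first.length : Int) + (second.length : Int) + (human_number - index) = 2 * PySem.Int.floordiv human_number 2 ∧
    2 ≤ PySem.Int.floordiv human_number 2) →
   ((∀ a ∈ first ++ PySem.List.pyRange index human_number 1, ∀ b ∈ first ++ PySem.List.pyRange index human_number 1, pvOkPair number_list a b) ∧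
    (∀ a ∈ second ++ PySem.List.pyRange index human_number 1, ∀ b ∈ second ++ PySem.List.pyRange index human_number 1, pvOkPair number_list a b)))

instance (index : Int) (human_number : Int) (number_list : List (List Int)) (first : List Int) (second : List Int) : Decidable (Pre_start_link index human_number number_list first second) := by
  unfold Pre_start_link pvOkPair; infer_instance

def pvWitness_start_link : Int × Int × List (List Int) × List Int × List Int :=
  (0, 4, [[0, 1, 2, 0], [1, 0, 3, 1], [2, 3, 0, 1], [0, 1, 1, 0]], [], [])

def Spec_start_link (index : Int) (human_number : Int) (number_list : List (List Int)) (first : List Int) (second : List Int) (out : Int) : Prop := out = start_link_alt index human_number number_list first second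
instance (index : Int) (human_number : Int) (number_list : List (List Int)) (first : List Int) (second : List Int) (out : Int) : Decidable (Spec_start_link index human_number number_list first second out) := by unfold Spec_start_link; infer_instance

-- ===== CLAIM (what is proved, stated in full; the proofs are below) =====
def Claim_equal_start_link : Prop := ∀ (index : Int) (human_number : Int) (number_list : List (List Int)) (first : List Int) (second : List Int), Dom_start_link index human_number number_list first second → Pre_start_link index human_number number_list first second → Spec_start_link index human_number number_list first second (start_link index human_number number_list first second)

-- ===== LEMMAS AND PROOFS =====

-- option-min with none = "no valid split yet"
def pvOmin : Option Int → Option Int → Option Int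
  | none, b => b
  | some a, none => some a
  | some a, some b => some (min a b)

-- the common mathematical value both recursions compute: the min leaf score over all assignments
def pvO (M : List (List Int)) (half : Int) : List Int → List Int → List Int → Option Int
  | [], f, s =>
    if (f.length : Int) = half ∧ (s.length : Int) = half then some |pvScore M f - pvScore M s| else none
  | x :: r, f, s => pvOmin (pvO M half r (f ++ [x]) s) (pvO M half r f (s ++ [x]))

def pvToInt : Option Int → Int
  | none => -1
  | some d => d

theorem pvOmin_assoc (a b c : Option Int) : pvOmin (pvOmin a b) c = pvOmin a (pvOmin b c) := by
  cases a <;> cases b <;> cases c <;> simp [pvOmin, min_assoc]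

theorem pvScore_snd (M : List (List Int)) (t : List Int) :
    ∀ (a : Int) (l : List Int),
      (t.foldl (fun (p : Int × List Int) x => (p.1 + pvLink M x p.2, p.2 ++ [x])) (a, l)).2 = l ++ t := by
  induction t with
  | nil => intro a l; simp
  | cons y ys ih => intro a l; simp [List.foldl_cons, ih]

theorem pvScore_append (M : List (List Int)) (t : List Int) (x : Int) :
    pvScore M (t ++ [x]) = pvScore M t + pvLink M x t := by
  unfold pvScore
  rw [List.foldl_append]
  simp [pvScore_snd]

-- sum form of the i≠j double loop, over Nat indices
def pvS (m : Nat → Nat → Int) (n : Nat) : Int :=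
  ((List.range n).map (fun i => ((List.range n).map (fun j => if i = j then 0 else m i j)).sum)).sum

theorem pvS_congr (m m' : Nat → Nat → Int) (n : Nat)
    (h : ∀ i < n, ∀ j < n, m i j = m' i j) : pvS m n = pvS m' n := by
  unfold pvS
  refine congrArg _ (List.map_congr_left fun i hi => congrArg _ (List.map_congr_left fun j hj => ?_))
  rw [List.mem_range] at hi hj
  by_cases hij : i = j <;> simp [hij, h i hi j hj]

theorem pvS_succ (m : Nat → Nat → Int) (n : Nat) :
    pvS m (n + 1) = pvS m n +
      (((List.range n).map (fun j => m n j)).sum + ((List.range n).map (fun i => m i n)).sum) := by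
  unfold pvS
  rw [List.range_succ]
  simp only [List.map_append, List.sum_append, List.map_cons, List.map_nil, List.sum_cons,
    List.sum_nil, add_zero]
  have e1 : (List.range n).map (fun i =>
        ((List.range n).map (fun j => if i = j then 0 else m i j)).sum + if i = n then 0 else m i n)
      = (List.range n).map (fun i =>
        ((List.range n).map (fun j => if i = j then 0 else m i j)).sum + m i n) :=
    List.map_congr_left fun i hi => by
      rw [List.mem_range] at hi
      rw [if_neg (by omega : ¬ i = n)]
  have e2 : (List.range n).map (fun j => if n = j then 0 else m n j)
      = (List.range n).map (fun j => m n j) :=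
    List.map_congr_left fun j hj => by
      rw [List.mem_range] at hj
      exact if_neg (by omega : ¬ n = j)
  rw [e1, PySem.List.sum_map_add_int, e2]
  simp only [if_pos trivial, add_zero]
  ring

-- the double loop with "continue" as a Nat-indexed fold
def pvDD (m : Nat → Nat → Int) (n : Nat) : Int :=
  (List.range n).foldl (fun a i => (List.range n).foldl (fun a j => if i = j then a else a + m i j) a) 0

theorem pvDD_eq_pvS (m : Nat → Nat → Int) (n : Nat) : pvDD m n = pvS m n := by
  unfold pvDD pvS
  have h1 : ∀ (a0 : Int) (i : Nat),
      (List.range n).foldl (fun a j => if i = j then a else a + m i j) a0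
        = a0 + ((List.range n).map (fun j => if i = j then 0 else m i j)).sum := by
    intro a0 i
    rw [show (fun (a : Int) (j : Nat) => if i = j then a else a + m i j)
        = (fun a j => a + (if i = j then 0 else m i j)) from by
      funext a j; split_ifs <;> simp]
    exact PySem.List.foldl_add _ _ _
  have h2 := PySem.List.foldl_congr_mem
    (l := List.range n) (init := (0 : Int))
    (f := fun a i => (List.range n).foldl (fun a j => if i = j then a else a + m i j) a)
    (g := fun a i => a + ((List.range n).map (fun j => if i = j then 0 else m i j)).sum)
    (fun acc i _ => h1 acc i)
  rw [h2, PySem.List.foldl_add]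
  simp

theorem getD_range_map (l : List Int) (d : Int) :
    (List.range l.length).map (fun i => l.getD i d) = l := by
  apply List.ext_getElem (by simp)
  intro i h1 h2
  simp [List.getD_eq_getElem?_getD, List.getElem?_eq_getElem h2]

theorem pvLink_eq_sum (M : List (List Int)) (x : Int) (t : List Int) :
    pvLink M x t = (t.map (fun y => pvM M x y + pvM M y x)).sum := by
  unfold pvLink
  rw [PySem.List.foldl_add]
  simp

-- both team-score computations agree: the position double loop equals the incremental score
theorem pvS_eq_score (M : List (List Int)) (t : List Int) :
    pvS (fun i j => pvM M (t.getD i 0) (t.getD j 0)) t.length = pvScore M t := by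
  induction t using List.reverseRecOn with
  | nil => rfl
  | append_singleton t x ih =>
    rw [pvScore_append, ← ih]
    have hlen : (t ++ [x]).length = t.length + 1 := by simp
    rw [hlen, pvS_succ]
    have hgetlt : ∀ i < t.length, (t ++ [x]).getD i 0 = t.getD i 0 := by
      intro i hi
      simp [List.getD_eq_getElem?_getD, List.getElem?_append_left hi]
    have hgetn : (t ++ [x]).getD t.length 0 = x := by
      simp [List.getD_eq_getElem?_getD]
    rw [pvS_congr _ (fun i j => pvM M (t.getD i 0) (t.getD j 0)) t.length
      (fun i hi j hj => by rw [hgetlt i hi, hgetlt j hj])]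
    congr 1
    rw [pvLink_eq_sum]
    simp only [hgetn]
    have eA : ∀ j ∈ List.range t.length,
        pvM M x ((t ++ [x]).getD j 0) = pvM M x (t.getD j 0) := fun j hj => by
      rw [List.mem_range] at hj
      rw [hgetlt j hj]
    have eB : ∀ i ∈ List.range t.length,
        pvM M ((t ++ [x]).getD i 0) x = pvM M (t.getD i 0) x := fun i hi => by
      rw [List.mem_range] at hi
      rw [hgetlt i hi]
    rw [List.map_congr_left eA, List.map_congr_left eB]
    rw [show (fun j => pvM M x (t.getD j 0)) = (fun z => pvM M x z) ∘ (fun j => t.getD j 0) from rfl,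
      show (fun i => pvM M (t.getD i 0) x) = (fun z => pvM M z x) ∘ (fun i => t.getD i 0) from rfl,
      ← List.map_map, ← List.map_map, getD_range_map,
      ← PySem.List.sum_map_add_int t (fun y => pvM M x y) (fun y => pvM M y x)]

-- the pair fold of A's leaf loop splits into two independent folds
theorem pvBase_split (L : List Int) (u v : Int → Int → Int) (p : Int × Int) :
    L.foldl (fun t i => L.foldl (fun t j => if i = j then t else (t.1 + u i j, t.2 + v i j)) t) p
      = (L.foldl (fun a i => L.foldl (fun a j => if i = j then a else a + u i j) a) p.1,
         L.foldl (fun a i => L.foldl (fun a j => if i = j then a else a + v i j) a) p.2) := by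
  obtain ⟨p1, p2⟩ := p
  have hin : ∀ (i : Int) (t : Int × Int),
      L.foldl (fun t j => if i = j then t else (t.1 + u i j, t.2 + v i j)) t
        = (L.foldl (fun a j => if i = j then a else a + u i j) t.1,
           L.foldl (fun a j => if i = j then a else a + v i j) t.2) := by
    intro i t
    obtain ⟨t1, t2⟩ := t
    rw [show (fun (t : Int × Int) j => if i = j then t else (t.1 + u i j, t.2 + v i j))
        = (fun t j => ((if i = j then t.1 else t.1 + u i j), (if i = j then t.2 else t.2 + v i j)))
        from by funext t j; split_ifs <;> simp]
    exact PySem.List.foldl_prod_mk (f := fun a j => if i = j then a else a + u i j)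
      (g := fun a j => if i = j then a else a + v i j) L t1 t2
  rw [show (fun (t : Int × Int) i =>
        L.foldl (fun t j => if i = j then t else (t.1 + u i j, t.2 + v i j)) t)
      = (fun (t : Int × Int) i =>
          ((fun a i => L.foldl (fun a j => if i = j then a else a + u i j) a) t.1 i,
           (fun a i => L.foldl (fun a j => if i = j then a else a + v i j) a) t.2 i)) from by
    funext t i; exact hin i t]
  exact PySem.List.foldl_prod_mk
    (f := fun a i => L.foldl (fun a j => if i = j then a else a + u i j) a)
    (g := fun a i => L.foldl (fun a j => if i = j then a else a + v i j) a) L p1 p2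

-- A's leaf double loop over one team, Int indices
theorem pvLoop_eq_score (M : List (List Int)) (t : List Int) :
    (PySem.List.pyRange 0 (t.length : Int) 1).foldl (fun a i =>
        (PySem.List.pyRange 0 (t.length : Int) 1).foldl (fun a j =>
          if i = j then a
          else a + pvM M (PySem.List.pyGetD t i 0) (PySem.List.pyGetD t j 0)) a) 0
      = pvScore M t := by
  rw [PySem.List.pyRange_zero_natCast]
  simp only [List.foldl_map, PySem.List.pyGetD_natCast, Nat.cast_inj]
  rw [show (fun (a : Int) (i : Nat) => (List.range t.length).foldl (fun a j =>
        if i = j then a else a + pvM M (t.getD i 0) (t.getD j 0)) a)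
      = (fun a i => (List.range t.length).foldl (fun a j =>
        if i = j then a else a + (fun i j => pvM M (t.getD i 0) (t.getD j 0)) i j) a) from rfl]
  rw [show (List.range t.length).foldl _ 0 = pvDD (fun i j => pvM M (t.getD i 0) (t.getD j 0)) t.length from rfl]
  rw [pvDD_eq_pvS, pvS_eq_score]

theorem pvBaseA_eq (M : List (List Int)) (half : Int) (first second : List Int)
    (h1 : (first.length : Int) = half) (h2 : (second.length : Int) = half) :
    pvBaseA M half first second = (pvScore M first, pvScore M second) := by
  unfold pvBaseA
  rw [pvBase_split (PySem.List.pyRange 0 half 1)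
    (fun i j => pvM M (PySem.List.pyGetD first i 0) (PySem.List.pyGetD first j 0))
    (fun i j => pvM M (PySem.List.pyGetD second i 0) (PySem.List.pyGetD second j 0)) (0, 0)]
  subst h1
  rw [pvLoop_eq_score M first, ← h2, pvLoop_eq_score M second]

theorem pvO_nonneg (M : List (List Int)) (half : Int) (rem : List Int) :
    ∀ (f s : List Int) (d : Int), pvO M half rem f s = some d → 0 ≤ d := by
  induction rem with
  | nil =>
    intro f s d h
    unfold pvO at h
    split at h
    · obtain rfl : |pvScore M f - pvScore M s| = d := by simpa using h
      positivity
    · simp at h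
  | cons x r ih =>
    intro f s d h
    unfold pvO at h
    cases h1 : pvO M half r (f ++ [x]) s <;> cases h2 : pvO M half r f (s ++ [x]) <;>
      rw [h1, h2] at h <;> simp [pvOmin] at h
    · exact h ▸ ih f (s ++ [x]) _ h2
    · exact h ▸ ih (f ++ [x]) s _ h1
    · have := ih (f ++ [x]) s _ h1
      have := ih f (s ++ [x]) _ h2
      subst h
      exact le_min ‹_› ‹_›

theorem pvO_none (M : List (List Int)) (half : Int) (rem : List Int) :
    ∀ (f s : List Int),
    ((f.length : Int) > half ∨ (s.length : Int) > half ∨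
     (f.length : Int) + (s.length : Int) + (rem.length : Int) ≠ 2 * half) →
    pvO M half rem f s = none := by
  induction rem with
  | nil =>
    intro f s h
    unfold pvO
    rw [if_neg]
    rintro ⟨h1, h2⟩
    simp at h
    omega
  | cons x r ih =>
    intro f s h
    unfold pvO
    rw [ih (f ++ [x]) s (by simp at h ⊢; omega), ih f (s ++ [x]) (by simp at h ⊢; omega)]
    rfl

theorem pvGoA_base (M : List (List Int)) (h : Int) (fuel : Nat) (f s : List Int) :
    pvGoA M h fuel h f s = pvToInt (pvO M (PySem.Int.floordiv h 2) (PySem.List.pyRange h h 1) f s) := by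
  rw [PySem.List.pyRange_one_eq_nil (le_refl h)]
  unfold pvGoA pvO
  rw [if_pos rfl]
  by_cases c1 : (f.length : Int) = PySem.Int.floordiv h 2
  · by_cases c2 : (s.length : Int) = PySem.Int.floordiv h 2
    · rw [if_neg (by simpa using c1), if_neg (by simpa using c2), if_pos ⟨c1, c2⟩,
        pvBaseA_eq M _ f s c1 c2]
      rfl
    · rw [if_neg (by simpa using c1), if_pos (by simpa using c2),
        if_neg (by rintro ⟨-, hc⟩; exact c2 hc)]
      rfl
  · rw [if_pos (by simpa using c1), if_neg (by rintro ⟨hc, -⟩; exact c1 hc)]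
    rfl

theorem pvGoA_eq (M : List (List Int)) (h : Int) (fuel : Nat) :
    ∀ (index : Int) (f s : List Int), index ≤ h → (h - index).toNat = fuel →
    pvGoA M h fuel index f s = pvToInt (pvO M (PySem.Int.floordiv h 2) (PySem.List.pyRange index h 1) f s) := by
  induction fuel with
  | zero =>
    intro index f s hle hf
    have : index = h := by omega
    rw [this]
    exact pvGoA_base M h 0 f s
  | succ k ih =>
    intro index f s hle hf
    by_cases hi : index = h
    · rw [hi]; exact pvGoA_base M h (k + 1) f s
    · have hlt : index < h := lt_of_le_of_ne hle hi
      rw [PySem.List.pyRange_one_cons hlt]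
      conv_lhs => rw [pvGoA]
      rw [if_neg hi]
      rw [ih (index + 1) (f ++ [index]) s (by omega) (by omega),
          ih (index + 1) f (s ++ [index]) (by omega) (by omega)]
      simp only [pvO]
      cases h1 : pvO M (PySem.Int.floordiv h 2) (PySem.List.pyRange (index + 1) h 1) (f ++ [index]) s with
      | none =>
        cases h2 : pvO M (PySem.Int.floordiv h 2) (PySem.List.pyRange (index + 1) h 1) f (s ++ [index]) <;>
          simp only [pvToInt, pvOmin, true_or, if_true]
      | some a =>
        have ha : 0 ≤ a := pvO_nonneg M _ _ _ _ _ h1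
        cases h2 : pvO M (PySem.Int.floordiv h 2) (PySem.List.pyRange (index + 1) h 1) f (s ++ [index]) with
        | none =>
          simp only [pvToInt, pvOmin, true_or, if_true]
          split_ifs <;> omega
        | some b =>
          have hb : 0 ≤ b := pvO_nonneg M _ _ _ _ _ h2
          simp only [pvToInt, pvOmin, true_or, if_true]
          split_ifs <;> omega

theorem pvDfs_eq (M : List (List Int)) (half : Int) (rem : List Int) :
    ∀ (f s : List Int) (best : Option Int),
    (f.length : Int) ≤ half → (s.length : Int) ≤ half →
    (f.length : Int) + (s.length : Int) + (rem.length : Int) = 2 * half →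
    pvDfs M half rem f s (pvScore M f) (pvScore M s) best = pvOmin best (pvO M half rem f s) := by
  induction rem with
  | nil =>
    intro f s best h1 h2 h3
    have hf : (f.length : Int) = half := by simp at h3; omega
    have hs : (s.length : Int) = half := by simp at h3; omega
    simp only [pvDfs, pvO,
      if_pos (show (f.length : Int) = half ∧ (s.length : Int) = half from ⟨hf, hs⟩)]
    cases best with
    | none => rfl
    | some b =>
      simp only [pvOmin]
      by_cases hd : |pvScore M f - pvScore M s| < b
      · rw [if_pos hd, min_eq_right hd.le]
      · rw [if_neg hd, min_eq_left (by omega)]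
  | cons x r ih =>
    intro f s best h1 h2 h3
    simp only [pvDfs, pvO]
    have hb1 : (if (f.length : Int) < half then
          pvDfs M half r (f ++ [x]) s (pvScore M f + pvLink M x f) (pvScore M s) best else best)
        = pvOmin best (pvO M half r (f ++ [x]) s) := by
      by_cases hf : (f.length : Int) < half
      · rw [if_pos hf, ← pvScore_append]
        exact ih (f ++ [x]) s best (by simp; omega) h2 (by simp at h3 ⊢; omega)
      · rw [if_neg hf, pvO_none M half r (f ++ [x]) s (Or.inl (by simp; omega))]
        cases best <;> rfl
    rw [hb1]
    by_cases hs : (s.length : Int) < half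
    · rw [if_pos hs, ← pvScore_append,
        ih f (s ++ [x]) _ h1 (by simp; omega) (by simp at h3 ⊢; omega), pvOmin_assoc]
    · rw [if_neg hs, pvO_none M half r f (s ++ [x]) (Or.inr (Or.inl (by simp; omega)))]
      cases pvO M half r (f ++ [x]) s <;> cases best <;> rfl

-- ===== VERDICT (by name: the statement is the Claim_ definition above) =====
theorem start_link_spec : Claim_equal_start_link := by
  intro index h M f s _ hpre
  unfold Spec_start_link
  obtain ⟨hih, -⟩ := hpre
  have hA : start_link index h M f s
      = pvToInt (pvO M (PySem.Int.floordiv h 2) (PySem.List.pyRange index h 1) f s) := by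
    exact pvGoA_eq M h (h - index).toNat index f s hih rfl
  have hlen : ((PySem.List.pyRange index h 1).length : Int) = h - index := by
    rw [PySem.List.length_pyRange_one]; omega
  rw [hA]
  have hBdef : start_link_alt index h M f s =
      (if (f.length : Int) > PySem.Int.floordiv h 2 ∨ (s.length : Int) > PySem.Int.floordiv h 2 ∨
          (f.length : Int) + (s.length : Int) + (h - index) ≠ 2 * PySem.Int.floordiv h 2 then -1
       else
         match pvDfs M (PySem.Int.floordiv h 2) (PySem.List.pyRange index h 1) f s
                 (pvScore M f) (pvScore M s) none with
         | none => -1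
         | some b => b) := rfl
  rw [hBdef]
  by_cases hc : (f.length : Int) > PySem.Int.floordiv h 2 ∨ (s.length : Int) > PySem.Int.floordiv h 2 ∨
      (f.length : Int) + (s.length : Int) + (h - index) ≠ 2 * PySem.Int.floordiv h 2
  · rw [if_pos hc, pvO_none M _ _ _ _ (by rw [hlen]; exact hc)]
    rfl
  · rw [if_neg hc]
    have h1 : (f.length : Int) ≤ PySem.Int.floordiv h 2 := by by_contra hx; exact hc (Or.inl (by omega))
    have h2 : (s.length : Int) ≤ PySem.Int.floordiv h 2 := by
      by_contra hx; exact hc (Or.inr (Or.inl (by omega)))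
    have h3 : (f.length : Int) + (s.length : Int) + ((PySem.List.pyRange index h 1).length : Int)
        = 2 * PySem.Int.floordiv h 2 := by
      rw [hlen]; by_contra hx; exact hc (Or.inr (Or.inr (by omega)))
    rw [pvDfs_eq M _ _ f s none h1 h2 h3]
    cases hO : pvO M (PySem.Int.floordiv h 2) (PySem.List.pyRange index h 1) f s <;> rfl
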